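-- pv_equiv track=rewrite | github.com/haukurb/Reynir | nntree.py | check_merge_candidate
-- ===== SOURCE A (Python) =====
-- def check_merge_candidate(idxed_mw_token, parse_tokens, term_idx_to_parse_idx):
--     # idx_mw_tokens has at least two tokens
--     allow_merge = True
--     last_ptok = None
--     last_pidx = None
--     first_pidx = None
--     for (idx, token) in idxed_mw_token:
--         pidx = term_idx_to_parse_idx[idx]
--         last_pidx = pidx - 1 if last_pidx is None else last_pidx
--         ptok = parse_tokens[pidx]
--         last_ptok = ptok if last_ptok is None else last_ptok
--
--         # parse_tokens must be contiguous and must match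
--         allow_merge = allow_merge and (last_ptok == ptok) and (last_pidx + 1 == pidx)
--         if not allow_merge:
--             return None
--
--         first_pidx = pidx if first_pidx is None else first_pidx
--         last_pidx = pidx
--         last_ptok = ptok
--     token_idxs, words = list(zip(*idxed_mw_token))
--
--     return (first_pidx, token_idxs[0], len(idxed_mw_token))
-- ===== SOURCE B (Python) =====
-- def check_merge_candidate(idxed_mw_token, parse_tokens, term_idx_to_parse_idx):
--     # Recursive decomposition: locate() resolves one multiword component to its
--     # (parse index, parse token) pair; chain() recursively checks that each
--     # subsequent pair is exactly the successor of the previous one.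
--     def locate(entry):
--         pidx = term_idx_to_parse_idx[entry[0]]
--         return pidx, parse_tokens[pidx]
--
--     def chain(prev, entries):
--         if not entries:
--             return True
--         cur = locate(entries[0])
--         if cur != (prev[0] + 1, prev[1]):
--             return False
--         return chain(cur, entries[1:])
--
--     first = locate(idxed_mw_token[0])
--     if not chain(first, idxed_mw_token[1:]):
--         return None
--     return (first[0], idxed_mw_token[0][0], len(idxed_mw_token))
-- ===== Notes on version B (the rewrite author's own statement) =====
-- stated objective: alternative
-- what changed: A's imperative loop with rolling allow_merge/last_pidx/last_ptok/first_pidx accumulators (None sentinels for the first iteration, early return, final zip(*...) unpack) is replaced by a recursive decomposition: a locate() helper resolving one component to its (parse index, parse token) pair and a recursive chain() predicate checking that each pair is exactly the successor of the previous pair.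
import Mathlib
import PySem

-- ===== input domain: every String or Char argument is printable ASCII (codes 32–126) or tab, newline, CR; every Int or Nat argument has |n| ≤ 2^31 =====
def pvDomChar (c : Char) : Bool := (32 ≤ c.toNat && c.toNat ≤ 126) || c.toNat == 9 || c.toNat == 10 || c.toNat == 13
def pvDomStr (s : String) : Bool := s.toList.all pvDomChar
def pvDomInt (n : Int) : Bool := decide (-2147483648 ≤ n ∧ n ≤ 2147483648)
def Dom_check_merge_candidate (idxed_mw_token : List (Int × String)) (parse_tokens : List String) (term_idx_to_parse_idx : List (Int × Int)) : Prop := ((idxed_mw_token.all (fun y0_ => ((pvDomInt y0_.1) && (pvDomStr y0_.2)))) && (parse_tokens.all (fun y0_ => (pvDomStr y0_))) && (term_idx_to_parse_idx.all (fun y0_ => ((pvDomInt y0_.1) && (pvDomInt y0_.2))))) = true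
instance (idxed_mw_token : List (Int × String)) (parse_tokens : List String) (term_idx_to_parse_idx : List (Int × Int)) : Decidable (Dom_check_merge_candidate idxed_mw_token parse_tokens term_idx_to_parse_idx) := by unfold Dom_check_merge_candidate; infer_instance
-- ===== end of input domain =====

-- B replaces A's loop with rolling allow_merge/last_pidx/last_ptok accumulators and final
-- zip-unpack by a recursive decomposition: a locate() helper resolving one component to its
-- (parse index, parse token) pair and a recursive chain() check that every pair is the exact
-- successor of the previous pair (objective: alternative; return value only, no mutation).

-- ===== PORT A =====
-- loop result: none = exception; some none = early `return None`; some (some fp) = loop finished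
def pvALoop (pts : List String) (d : List (Int × Int)) :
    List (Int × String) → Option String → Option Int → Option Int → Option (Option (Option Int))
  | [], _, _, firstPidx => some (some firstPidx)
  | (idx, _) :: rest, lastPtok, lastPidx, firstPidx =>
    match (PySem.Dict.mk d).get? idx with
    | none => none
    | some pidx =>
      let lastPidx' : Int := match lastPidx with | none => pidx - 1 | some v => v
      match PySem.List.pyGet? pts pidx with
      | none => none
      | some ptok =>
        let lastPtok' : String := match lastPtok with | none => ptok | some t => t
        if lastPtok' == ptok && lastPidx' + 1 == pidx then
          pvALoop pts d rest (some ptok) (some pidx) (some (firstPidx.getD pidx))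
        else some none

def check_merge_candidate (idxed_mw_token : List (Int × String)) (parse_tokens : List String) (term_idx_to_parse_idx : List (Int × Int)) : Option (Int × Int × Int) :=
  match pvALoop parse_tokens term_idx_to_parse_idx idxed_mw_token none none none, idxed_mw_token with
  | some (some (some fp)), (i0, _) :: _ => some (fp, i0, (idxed_mw_token.length : Int))
  | _, _ => none

-- ===== PORT B =====
-- locate(entry): (parse index, parse token) of one component; none = KeyError/IndexError
def pvLocate (pts : List String) (d : List (Int × Int)) (entry : Int × String) :
    Option (Int × String) :=
  match (PySem.Dict.mk d).get? entry.1 with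
  | none => none
  | some pidx =>
    match PySem.List.pyGet? pts pidx with
    | none => none
    | some ptok => some (pidx, ptok)

-- chain(prev, entries); none = exception, some b = the Python's boolean
def pvChain (pts : List String) (d : List (Int × Int)) :
    Int × String → List (Int × String) → Option Bool
  | _, [] => some true
  | prev, e :: rest =>
    match pvLocate pts d e with
    | none => none
    | some cur =>
      if cur ≠ (prev.1 + 1, prev.2) then some false
      else pvChain pts d cur rest

def check_merge_candidate_alt (idxed_mw_token : List (Int × String)) (parse_tokens : List String) (term_idx_to_parse_idx : List (Int × Int)) : Option (Int × Int × Int) :=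
  match idxed_mw_token with
  | [] => none                   -- Python B raises IndexError here (outside Pre_)
  | e0 :: rest =>
    match pvLocate parse_tokens term_idx_to_parse_idx e0 with
    | none => none               -- exception (outside Pre_)
    | some first =>
      match pvChain parse_tokens term_idx_to_parse_idx first rest with
      | none => none             -- exception (outside Pre_)
      | some false => none
      | some true => some (first.1, e0.1, (idxed_mw_token.length : Int))

-- ===== PRECONDITION & SPEC =====
def pvKey (l : List (Int × String)) (k : Nat) : Int := (l.getD k (0, "")).1

-- lookup at position k succeeds (key present and parse index in Python range)
def pvLookupOK (mw : List (Int × String)) (pts : List String) (d : List (Int × Int)) (k : Nat) : Bool :=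
  (Option.bind ((PySem.Dict.mk d).get? (pvKey mw k)) (fun p => PySem.List.pyGet? pts p)).isSome

-- step j passes A's check: parse index = first parse index + j, token = first token
def pvStepOK (mw : List (Int × String)) (pts : List String) (d : List (Int × Int)) (j : Nat) : Bool :=
  let p0? := (PySem.Dict.mk d).get? (pvKey mw 0)
  let b := p0?.getD 0
  (PySem.Dict.mk d).get? (pvKey mw j) == p0?.map (· + (j : Int)) &&
  (PySem.List.pyGet? pts (b + (j : Int))).isSome &&
  PySem.List.pyGet? pts (b + (j : Int)) == PySem.List.pyGet? pts b

-- exactly the inputs where Python A returns: the token list is nonempty (A unpacks it at the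
-- end), and whenever every earlier position passed A's contiguity/match check, the current
-- position's two lookups succeed (otherwise A raises KeyError/IndexError there, and so does B).
def Pre_check_merge_candidate (idxed_mw_token : List (Int × String)) (parse_tokens : List String) (term_idx_to_parse_idx : List (Int × Int)) : Prop :=
  idxed_mw_token ≠ [] ∧
  ∀ k : Nat, k < idxed_mw_token.length →
    (∀ j : Nat, j < k → pvStepOK idxed_mw_token parse_tokens term_idx_to_parse_idx j = true) →
    pvLookupOK idxed_mw_token parse_tokens term_idx_to_parse_idx k = true
instance (idxed_mw_token : List (Int × String)) (parse_tokens : List String) (term_idx_to_parse_idx : List (Int × Int)) : Decidable (Pre_check_merge_candidate idxed_mw_token parse_tokens term_idx_to_parse_idx) := by unfold Pre_check_merge_candidate; infer_instance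

def pvWitness_check_merge_candidate : (List (Int × String)) × List String × (List (Int × Int)) :=
  ([(0, "the"), (1, "dog")], ["x", "x"], [(0, 0), (1, 1)])

def Spec_check_merge_candidate (idxed_mw_token : List (Int × String)) (parse_tokens : List String) (term_idx_to_parse_idx : List (Int × Int)) (out : Option (Int × Int × Int)) : Prop := out = check_merge_candidate_alt idxed_mw_token parse_tokens term_idx_to_parse_idx
instance (idxed_mw_token : List (Int × String)) (parse_tokens : List String) (term_idx_to_parse_idx : List (Int × Int)) (out : Option (Int × Int × Int)) : Decidable (Spec_check_merge_candidate idxed_mw_token parse_tokens term_idx_to_parse_idx out) := by unfold Spec_check_merge_candidate; infer_instance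

-- ===== CLAIM (what is proved, stated in full; the proofs are below) =====
def Claim_equal_check_merge_candidate : Prop := ∀ (idxed_mw_token : List (Int × String)) (parse_tokens : List String) (term_idx_to_parse_idx : List (Int × Int)), Dom_check_merge_candidate idxed_mw_token parse_tokens term_idx_to_parse_idx → Pre_check_merge_candidate idxed_mw_token parse_tokens term_idx_to_parse_idx → Spec_check_merge_candidate idxed_mw_token parse_tokens term_idx_to_parse_idx (check_merge_candidate idxed_mw_token parse_tokens term_idx_to_parse_idx)

-- ===== LEMMAS AND PROOFS =====

-- once both sides carry a previous (parse index, parse token) pair, A's rolling loop and B's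
-- recursive chain agree step for step (including which exception, if any, stops them)
theorem pv_chain_agree (pts : List String) (d : List (Int × Int)) :
    ∀ (rest : List (Int × String)) (p0 fp : Int) (t0 : String),
      pvALoop pts d rest (some t0) (some p0) (some fp)
        = (match pvChain pts d (p0, t0) rest with
           | none => none
           | some false => some none
           | some true => some (some (some fp))) := by
  intro rest
  induction rest with
  | nil => intro p0 fp t0; simp [pvALoop, pvChain]
  | cons hd tl ih =>
    intro p0 fp t0
    obtain ⟨idx, w⟩ := hd
    simp only [pvALoop, pvChain, pvLocate]
    cases hL : (PySem.Dict.mk d).get? idx with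
    | none => rfl
    | some pidx =>
      cases hG : PySem.List.pyGet? pts pidx with
      | none => simp only [hG]
      | some ptok =>
        simp only [hG, Option.getD_some]
        by_cases hp : pidx = p0 + 1
        · by_cases ht : ptok = t0
          · subst hp ht
            have hA : (ptok == ptok && (p0 + 1 == p0 + 1)) = true := by simp
            have hB : ¬ ((p0 + 1, ptok) ≠ (p0 + 1, ptok)) := by simp
            rw [hA, if_neg hB]
            simp only [if_true]
            exact ih (p0 + 1) fp ptok
          · have hA : (t0 == ptok && (p0 + 1 == pidx)) = false := by
              simp; intro h; exact absurd h.symm ht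
            have hB : ((pidx, ptok) ≠ (p0 + 1, t0)) := by simp [ht]
            rw [hA, if_pos hB]
            simp only [Bool.false_eq_true, if_false]
        · have hA : (t0 == ptok && (p0 + 1 == pidx)) = false := by
            simp; intro _; omega
          have hB : ((pidx, ptok) ≠ (p0 + 1, t0)) := by simp; intro h; exact absurd h hp
          rw [hA, if_pos hB]
          simp only [Bool.false_eq_true, if_false]

-- ===== VERDICT (by name: the statement is the Claim_ definition above) =====
theorem check_merge_candidate_spec : Claim_equal_check_merge_candidate := by
  intro mw pts d _hdom hpre
  unfold Spec_check_merge_candidate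
  cases mw with
  | nil => exact absurd rfl hpre.1
  | cons e0 tl =>
    obtain ⟨i0, w0⟩ := e0
    rw [check_merge_candidate.eq_def, check_merge_candidate_alt]
    cases hL : (PySem.Dict.mk d).get? i0 with
    | none =>
      simp only [pvALoop, pvLocate, hL]
    | some fp =>
      cases hG : PySem.List.pyGet? pts fp with
      | none =>
        simp only [pvALoop, pvLocate, hL, hG]
      | some bt =>
        simp only [pvALoop, pvLocate, hL, hG, Option.getD_none]
        have hA : (bt == bt && (fp - 1 + 1 == fp)) = true := by simp
        rw [hA]
        simp only [if_true]
        rw [pv_chain_agree pts d tl fp fp bt]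
        cases hC : pvChain pts d (fp, bt) tl with
        | none => rfl
        | some b => cases b <;> rfl
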